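-- pv_equiv track=rewrite | github.com/granttremel/genomics | ggene/genemap.py | order_chromes
-- ===== SOURCE A (Python) =====
-- def order_chromes(chromes):
--
--     intchrs = []
--     otherchrs = []
--
--     for chr in chromes:
--         try:
--             v = int(chr)
--             intchrs.append(chr)
--         except:
--             otherchrs.append(chr)
--
--     int_srt = sorted(intchrs, key = lambda c:int(c))
--     return int_srt + otherchrs
-- ===== SOURCE B (Python) =====
-- def order_chromes(chromes):
--     def _key(c):
--         try:
--             return (0, int(c))
--         except Exception:
--             return (1, 0)
--     return sorted(chromes, key=_key)
-- ===== Notes on version B (the rewrite author's own statement) =====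
-- stated objective: simpler
-- what changed: Replaces the partition-into-two-lists / sort-numerics / concatenate pipeline with a single stable sort of the whole list under the key (0, int(c)) for numeric strings and (1, 0) for the rest; stability reproduces A's ordering exactly.
import Mathlib
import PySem

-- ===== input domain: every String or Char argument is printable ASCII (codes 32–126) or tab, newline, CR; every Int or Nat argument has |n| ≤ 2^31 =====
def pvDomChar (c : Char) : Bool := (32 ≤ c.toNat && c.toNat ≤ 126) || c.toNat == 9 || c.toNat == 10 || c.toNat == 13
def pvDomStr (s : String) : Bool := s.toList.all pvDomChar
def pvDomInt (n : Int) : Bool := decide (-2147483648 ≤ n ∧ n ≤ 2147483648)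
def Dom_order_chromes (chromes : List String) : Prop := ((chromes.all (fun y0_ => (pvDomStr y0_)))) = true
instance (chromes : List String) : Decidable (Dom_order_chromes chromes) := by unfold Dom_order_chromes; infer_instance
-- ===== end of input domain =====

-- B replaces A's partition/sort/concat with one stable sort of the whole list under the
-- key (0, int(c)) for int-parsable strings and (1, 0) for the rest (objective: simpler).

-- ===== PORT A =====
-- for-loop with try int(chr): accumulate (intchrs, otherchrs); then sorted(intchrs, key=int) ++ otherchrs
def order_chromes (chromes : List String) : List String :=
  let st := chromes.foldl
    (fun (acc : List String × List String) chr =>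
      match PySem.Int.ofStr? chr with                 -- int(chr): some = returns, none = raises (caught)
      | some _ => (acc.1 ++ [chr], acc.2)
      | none   => (acc.1, acc.2 ++ [chr]))
    ([], [])
  let int_srt := PySem.List.sorted st.1 (fun c => (PySem.Int.ofStr? c).getD 0)  -- key=int(c); on intchrs it always parses
  int_srt ++ st.2

-- ===== PORT B =====
-- sorted(chromes, key=_key) with _key(c) = (0, int(c)) if int(c) succeeds else (1, 0)
def order_chromes_alt (chromes : List String) : List String :=
  PySem.List.sorted2 chromes
    (fun c => if (PySem.Int.ofStr? c).isSome then (0 : Int) else 1)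
    (fun c => (PySem.Int.ofStr? c).getD 0)

-- ===== PRECONDITION & SPEC =====
def Spec_order_chromes (chromes : List String) (out : List String) : Prop := out = order_chromes_alt chromes
instance (chromes : List String) (out : List String) : Decidable (Spec_order_chromes chromes out) := by unfold Spec_order_chromes; infer_instance

-- ===== CLAIM (what is proved, stated in full; the proofs are below) =====
def Claim_equal_order_chromes : Prop := ∀ (chromes : List String), Dom_order_chromes chromes → Spec_order_chromes chromes (order_chromes chromes)

-- ===== LEMMAS AND PROOFS =====

-- abbreviations for the proofs (not used by the ports or by Spec_)
def pvP (c : String) : Bool := (PySem.Int.ofStr? c).isSome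
def pvK (c : String) : Int := (PySem.Int.ofStr? c).getD 0
-- B's comparison (the `lt` sorted2 builds from the two keys, reverse = false)
def pvLtB (a b : String) : Bool :=
  decide ((if pvP a then (0:Int) else 1) < (if pvP b then (0:Int) else 1)) ||
  (!decide ((if pvP b then (0:Int) else 1) < (if pvP a then (0:Int) else 1)) && decide (pvK a < pvK b))
-- A's comparison inside sorted(intchrs, key=int)
def pvLtA (a b : String) : Bool := decide (pvK a < pvK b)

lemma pvLtB_true_of_p_np {x y : String} (hx : pvP x = true) (hy : pvP y = false) :
    pvLtB x y = true := by simp [pvLtB, hx, hy]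

lemma pvLtB_eq_ltA_of_p_p {x y : String} (hx : pvP x = true) (hy : pvP y = true) :
    pvLtB x y = pvLtA x y := by simp [pvLtB, pvLtA, hx, hy]

lemma pvLtB_false_of_np {x y : String} (hx : pvP x = false) : pvLtB x y = false := by
  cases hy : pvP y with
  | false =>
      have hkx : pvK x = 0 := by
        simp [pvK]; cases h : PySem.Int.ofStr? x with
        | none => simp
        | some v => simp [pvP, h] at hx
      have hky : pvK y = 0 := by
        simp [pvK]; cases h : PySem.Int.ofStr? y with
        | none => simp
        | some v => simp [pvP, h] at hy
      simp [pvLtB, hx, hy, hkx, hky]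
  | true => simp [pvLtB, hx, hy]

lemma insertBy_congr (b1 b2 : String → String → Bool) (x : String) (ys : List String)
    (h : ∀ y ∈ ys, b1 x y = b2 x y) :
    PySem.List.insertBy b1 x ys = PySem.List.insertBy b2 x ys := by
  induction ys with
  | nil => rfl
  | cons y ys ih =>
      have hy := h y (by simp)
      simp only [PySem.List.insertBy, hy]
      split
      · rfl
      · simp [ih (fun z hz => h z (by simp [hz]))]

lemma insertBy_append_left (before : String → String → Bool) (x : String)
    (S O : List String) (h : ∀ y ∈ O, before x y = true) :
    PySem.List.insertBy before x (S ++ O) = PySem.List.insertBy before x S ++ O := by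
  induction S with
  | nil =>
      cases O with
      | nil => rfl
      | cons o O' => simp [PySem.List.insertBy, h o (by simp)]
  | cons s S ih =>
      simp only [List.cons_append, PySem.List.insertBy]
      split
      · rfl
      · simp [ih]

/-- Main invariant: folding B's insertion sort over `xs` starting from a sorted
numeric block `S` followed by a non-numeric block `O` yields A's shape. -/
lemma pv_main (xs : List String) : ∀ (S O : List String),
    (∀ y ∈ S, pvP y = true) → (∀ y ∈ O, pvP y = false) →
    xs.foldl (fun acc x => PySem.List.insertBy pvLtB x acc) (S ++ O)
      = (xs.filter pvP).foldl (fun acc x => PySem.List.insertBy pvLtA x acc) S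
        ++ (O ++ xs.filter (fun x => !pvP x)) := by
  induction xs with
  | nil => intro S O _ _; simp
  | cons x xs ih =>
      intro S O hS hO
      cases hx : pvP x with
      | true =>
          have h1 : PySem.List.insertBy pvLtB x (S ++ O)
              = PySem.List.insertBy pvLtA x S ++ O := by
            rw [insertBy_append_left pvLtB x S O
                (fun y hy => pvLtB_true_of_p_np hx (hO y hy)),
              insertBy_congr pvLtB pvLtA x S
                (fun y hy => pvLtB_eq_ltA_of_p_p hx (hS y hy))]
          have hS' : ∀ y ∈ PySem.List.insertBy pvLtA x S, pvP y = true := by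
            intro y hy
            rcases (PySem.List.mem_insertBy _ _ _ _).1 hy with h | h
            · exact h ▸ hx
            · exact hS y h
          simp only [List.foldl_cons, h1, List.filter_cons, hx]
          simpa using ih (PySem.List.insertBy pvLtA x S) O hS' hO
      | false =>
          have h1 : PySem.List.insertBy pvLtB x (S ++ O) = S ++ (O ++ [x]) := by
            rw [PySem.List.insertBy_of_forall_not_before pvLtB x (S ++ O)
              (fun y _ => pvLtB_false_of_np hx)]
            simp
          have hO' : ∀ y ∈ O ++ [x], pvP y = false := by
            intro y hy
            rcases List.mem_append.1 hy with h | h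
            · exact hO y h
            · simp at h; exact h ▸ hx
          simp only [List.foldl_cons, h1, List.filter_cons, hx]
          simpa using ih S (O ++ [x]) hS hO'

/-- A's accumulator loop computes the two filters. -/
lemma pv_partition (xs : List String) : ∀ (S O : List String),
    xs.foldl
      (fun (acc : List String × List String) chr =>
        match PySem.Int.ofStr? chr with
        | some _ => (acc.1 ++ [chr], acc.2)
        | none   => (acc.1, acc.2 ++ [chr])) (S, O)
      = (S ++ xs.filter pvP, O ++ xs.filter (fun x => !pvP x)) := by
  induction xs with
  | nil => intro S O; simp
  | cons x xs ih =>
      intro S O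
      cases h : PySem.Int.ofStr? x with
      | some v => simp [List.foldl_cons, h, ih, pvP]
      | none => simp [List.foldl_cons, h, ih, pvP]

-- ===== VERDICT (by name: the statement is the Claim_ definition above) =====
theorem order_chromes_spec : Claim_equal_order_chromes := by
  intro chromes _
  unfold Spec_order_chromes order_chromes
  rw [pv_partition chromes [] []]
  simp only [List.nil_append]
  have h := pv_main chromes [] [] (by simp) (by simp)
  simp only [List.nil_append] at h
  exact h.symm
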